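-- pv_equiv track=rewrite | github.com/caroline-kranefuss/caroline-kranefuss | python/regular_expressions/relay_race.py | sort_runners
-- ===== SOURCE A (Python) =====
-- def sort_runners(cleaned_runners):
--     runners_in_order = {}
--     counter = 1
--     while counter < 7:
--         for key, value in cleaned_runners.items():
--             if len(value) == counter:
--                runners_in_order[key] = value
--         counter += 1
--     return runners_in_order
-- ===== SOURCE B (Python) =====
-- def sort_runners(cleaned_runners):
--     buckets = {n: [] for n in range(1, 7)}
--     for key, value in cleaned_runners.items():
--         n = len(value)
--         if 1 <= n <= 6:
--             buckets[n].append((key, value))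
--     return {key: value for n in range(1, 7) for key, value in buckets[n]}
-- ===== Notes on version B (the rewrite author's own statement) =====
-- stated objective: alternative
-- what changed: Replaces the six repeated scans of the dict (one per value length 1..6) by a single pass that distributes each item into a length-indexed bucket list and then concatenates the buckets in order.
import Mathlib
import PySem

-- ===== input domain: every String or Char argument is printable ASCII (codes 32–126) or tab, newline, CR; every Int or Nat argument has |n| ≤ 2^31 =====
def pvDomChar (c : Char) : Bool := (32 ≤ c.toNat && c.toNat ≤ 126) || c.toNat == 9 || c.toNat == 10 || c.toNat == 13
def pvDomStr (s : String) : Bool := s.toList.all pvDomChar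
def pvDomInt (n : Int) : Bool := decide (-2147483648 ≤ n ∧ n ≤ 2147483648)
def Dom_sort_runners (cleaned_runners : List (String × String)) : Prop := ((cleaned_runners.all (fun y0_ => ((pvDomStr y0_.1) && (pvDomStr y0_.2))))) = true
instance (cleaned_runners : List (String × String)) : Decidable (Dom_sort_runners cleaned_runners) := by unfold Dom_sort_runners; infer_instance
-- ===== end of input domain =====

-- B replaces A's six scans of the dict (one per length 1..6) by a single bucketing pass; return-value equivalence on duplicate-free association lists.

-- ===== PORT A =====
-- while counter < 7 with counter += 1 is the loop over counters 1..6; the inner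
-- for/if writes runners_in_order[key] = value via Dict.insert.
def sort_runners (cleaned_runners : List (String × String)) : List (String × String) :=
  ((PySem.List.pyRange 1 7 1).foldl
    (fun (d : PySem.Dict String String) (counter : Int) =>
      cleaned_runners.foldl
        (fun (d : PySem.Dict String String) kv =>
          if PySem.Str.len kv.2 = counter then d.insert kv.1 kv.2 else d) d)
    PySem.Dict.empty).items

-- ===== PORT B =====
-- one pass: drop each (key, value) into the bucket for len(value) (lengths 1..6 only),
-- then concatenate the buckets in order.
def bucketStep (bs : List (List (String × String))) (kv : String × String) :
    List (List (String × String)) :=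
  let n := PySem.Str.len kv.2
  if 1 ≤ n ∧ n ≤ 6 then bs.set (n.toNat - 1) (bs.getD (n.toNat - 1) [] ++ [kv]) else bs

def sort_runners_alt (cleaned_runners : List (String × String)) : List (String × String) :=
  (cleaned_runners.foldl bucketStep (List.replicate 6 [])).flatten

-- ===== PRECONDITION & SPEC =====
-- Pre_ excludes association lists with duplicate keys: those do not represent a Python
-- dict, which is the declared parameter type, so A never receives them.
def Pre_sort_runners (cleaned_runners : List (String × String)) : Prop :=
  (cleaned_runners.map Prod.fst).Nodup
instance (cleaned_runners : List (String × String)) : Decidable (Pre_sort_runners cleaned_runners) := by unfold Pre_sort_runners; infer_instance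

def pvWitness_sort_runners : (List (String × String)) :=
  [("alice", "abcd"), ("bob", "ab"), ("carol", "abc")]

def Spec_sort_runners (cleaned_runners : List (String × String)) (out : List (String × String)) : Prop := out = sort_runners_alt cleaned_runners
instance (cleaned_runners : List (String × String)) (out : List (String × String)) : Decidable (Spec_sort_runners cleaned_runners out) := by unfold Spec_sort_runners; infer_instance

-- ===== CLAIM (what is proved, stated in full; the proofs are below) =====
def Claim_equal_sort_runners : Prop := ∀ (cleaned_runners : List (String × String)), Dom_sort_runners cleaned_runners → Pre_sort_runners cleaned_runners → Spec_sort_runners cleaned_runners (sort_runners cleaned_runners)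

-- ===== LEMMAS AND PROOFS =====

-- the pairs of the input whose value has length c
def lenF (cleaned : List (String × String)) (c : Int) : List (String × String) :=
  cleaned.filter (fun kv => decide (PySem.Str.len kv.2 = c))

theorem key_inj {cleaned : List (String × String)}
    (h : (cleaned.map Prod.fst).Nodup) :
    ∀ a ∈ cleaned, ∀ b ∈ cleaned, a.1 = b.1 → a = b := by
  intro a ha b hb hab
  exact List.inj_on_of_nodup_map h ha hb hab

theorem lenF_key_disjoint {cleaned : List (String × String)}
    (h : (cleaned.map Prod.fst).Nodup) {c c' : Int} (hne : c ≠ c') :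
    ∀ a ∈ lenF cleaned c, a.1 ∉ (lenF cleaned c').map Prod.fst := by
  intro a ha hmem
  obtain ⟨b, hb, hba⟩ := List.mem_map.mp hmem
  have ha' := List.mem_filter.mp ha
  have hb' := List.mem_filter.mp hb
  have : a = b := key_inj h a ha'.1 b hb'.1 hba.symm
  subst this
  have h1 : PySem.Str.len a.2 = c := of_decide_eq_true ha'.2
  have h2 : PySem.Str.len a.2 = c' := of_decide_eq_true hb'.2
  exact hne (h1 ▸ h2)

-- one counter pass appends exactly the pairs of length c, in input order
theorem pass_items (cleaned : List (String × String))
    (h : (cleaned.map Prod.fst).Nodup) (c : Int) (d : PySem.Dict String String)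
    (hd : ∀ a ∈ lenF cleaned c, d.contains a.1 = false) :
    (cleaned.foldl
      (fun (d : PySem.Dict String String) kv =>
        if PySem.Str.len kv.2 = c then d.insert kv.1 kv.2 else d) d).items
      = d.items ++ lenF cleaned c := by
  have hstep : (cleaned.foldl
      (fun (d : PySem.Dict String String) kv =>
        if PySem.Str.len kv.2 = c then d.insert kv.1 kv.2 else d) d)
      = (lenF cleaned c).foldl (fun (d : PySem.Dict String String) kv => d.insert kv.1 kv.2) d := by
    rw [lenF, List.foldl_filter]
    simp only [decide_eq_true_eq]
  rw [hstep]
  have hnd : ((lenF cleaned c).map Prod.fst).Nodup :=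
    h.sublist (List.Sublist.map Prod.fst List.filter_sublist)
  have := PySem.Dict.items_foldl_insert_fresh (l := lenF cleaned c)
    (k := Prod.fst) (v := Prod.snd) (d := d) hd hnd
  simpa using this

theorem passes_items (cleaned : List (String × String))
    (h : (cleaned.map Prod.fst).Nodup) :
    ∀ (cs : List Int), cs.Nodup → ∀ (d : PySem.Dict String String),
    (∀ c ∈ cs, ∀ a ∈ lenF cleaned c, d.contains a.1 = false) →
    (cs.foldl
      (fun (d : PySem.Dict String String) (counter : Int) =>
        cleaned.foldl
          (fun (d : PySem.Dict String String) kv =>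
            if PySem.Str.len kv.2 = counter then d.insert kv.1 kv.2 else d) d) d).items
      = d.items ++ cs.flatMap (lenF cleaned) := by
  intro cs
  induction cs with
  | nil => intro _ d _; simp
  | cons c cs ih =>
    intro hnodup d hd
    have hnd' := (List.nodup_cons.mp hnodup)
    rw [List.foldl_cons, List.flatMap_cons]
    have hpass := pass_items cleaned h c d (hd c (by simp))
    rw [ih hnd'.2 _ ?_, hpass, List.append_assoc]
    intro c' hc' a ha
    have hkeys : (cleaned.foldl
        (fun (d : PySem.Dict String String) kv =>
          if PySem.Str.len kv.2 = c then d.insert kv.1 kv.2 else d) d).keys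
        = d.keys ++ (lenF cleaned c).map Prod.fst := by
      simp only [PySem.Dict.keys, hpass, List.map_append]
    rw [PySem.Dict.contains_eq_decide_mem_keys, hkeys, decide_eq_false_iff_not]
    intro hmem
    rcases List.mem_append.mp hmem with hm | hm
    · have := hd c' (by simp [hc']) a ha
      rw [PySem.Dict.contains_eq_decide_mem_keys, decide_eq_false_iff_not] at this
      exact this hm
    · have hne : c' ≠ c := fun he => hnd'.1 (he ▸ hc')
      exact lenF_key_disjoint h hne a ha hm

theorem A_eq (cleaned : List (String × String))
    (h : (cleaned.map Prod.fst).Nodup) :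
    sort_runners cleaned
      = lenF cleaned 1 ++ lenF cleaned 2 ++ lenF cleaned 3 ++ lenF cleaned 4
        ++ lenF cleaned 5 ++ lenF cleaned 6 := by
  unfold sort_runners
  have hr : PySem.List.pyRange 1 7 1 = [1, 2, 3, 4, 5, 6] := by decide
  rw [hr, passes_items cleaned h [1, 2, 3, 4, 5, 6] (by decide) PySem.Dict.empty
    (by intro c _ a _; exact PySem.Dict.contains_empty a.1)]
  simp [List.flatMap_cons, List.append_assoc, PySem.Dict.empty]

theorem B_inv (cleaned : List (String × String)) :
    ∀ (b1 b2 b3 b4 b5 b6 : List (String × String)),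
    cleaned.foldl bucketStep [b1, b2, b3, b4, b5, b6]
      = [b1 ++ lenF cleaned 1, b2 ++ lenF cleaned 2, b3 ++ lenF cleaned 3,
         b4 ++ lenF cleaned 4, b5 ++ lenF cleaned 5, b6 ++ lenF cleaned 6] := by
  induction cleaned with
  | nil => intro b1 b2 b3 b4 b5 b6; simp [lenF]
  | cons kv l ih =>
    intro b1 b2 b3 b4 b5 b6
    rw [List.foldl_cons]
    have hnn : 0 ≤ PySem.Str.len kv.2 := by simp
    by_cases hb : 1 ≤ PySem.Str.len kv.2 ∧ PySem.Str.len kv.2 ≤ 6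
    · set n : Int := PySem.Str.len kv.2 with hn
      have h1 := hb.1
      have h2 := hb.2
      interval_cases n
      · have hacc : bucketStep [b1, b2, b3, b4, b5, b6] kv = [b1 ++ [kv], b2, b3, b4, b5, b6] := by
          unfold bucketStep; rw [← hn]; simp
        rw [hacc, ih]
        have hl := hn.symm
        simp at hl
        simp [lenF, List.filter_cons, List.append_assoc]
        omega
      · have hacc : bucketStep [b1, b2, b3, b4, b5, b6] kv = [b1, b2 ++ [kv], b3, b4, b5, b6] := by
          unfold bucketStep; rw [← hn]; simp
        rw [hacc, ih]
        have hl := hn.symm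
        simp at hl
        simp [lenF, List.filter_cons, List.append_assoc]
        omega
      · have hacc : bucketStep [b1, b2, b3, b4, b5, b6] kv = [b1, b2, b3 ++ [kv], b4, b5, b6] := by
          unfold bucketStep; rw [← hn]; simp
        rw [hacc, ih]
        have hl := hn.symm
        simp at hl
        simp [lenF, List.filter_cons, List.append_assoc]
        omega
      · have hacc : bucketStep [b1, b2, b3, b4, b5, b6] kv = [b1, b2, b3, b4 ++ [kv], b5, b6] := by
          unfold bucketStep; rw [← hn]; simp
        rw [hacc, ih]
        have hl := hn.symm
        simp at hl
        simp [lenF, List.filter_cons, List.append_assoc]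
        omega
      · have hacc : bucketStep [b1, b2, b3, b4, b5, b6] kv = [b1, b2, b3, b4, b5 ++ [kv], b6] := by
          unfold bucketStep; rw [← hn]; simp
        rw [hacc, ih]
        have hl := hn.symm
        simp at hl
        simp [lenF, List.filter_cons, List.append_assoc]
        omega
      · have hacc : bucketStep [b1, b2, b3, b4, b5, b6] kv = [b1, b2, b3, b4, b5, b6 ++ [kv]] := by
          unfold bucketStep; rw [← hn]; simp
        rw [hacc, ih]
        have hl := hn.symm
        simp at hl
        simp [lenF, List.filter_cons, List.append_assoc]
        omega
    · have hacc : bucketStep [b1, b2, b3, b4, b5, b6] kv = [b1, b2, b3, b4, b5, b6] := by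
        have hb2 := hb
        simp at hb2
        unfold bucketStep
        simp
        intro hx1 hx2
        omega
      rw [hacc, ih]
      have : ∀ c : Int, 1 ≤ c → c ≤ 6 → lenF (kv :: l) c = lenF l c := by
        intro c hc1 hc2
        simp only [lenF, List.filter_cons]
        have hne : ¬ PySem.Str.len kv.2 = c := by
          intro he; exact hb ⟨he ▸ hc1, he ▸ hc2⟩
        rw [show PySem.Str.len kv.2 = (kv.2.length : Int) by simp] at hne
        simp [hne]
      rw [this 1 (by norm_num) (by norm_num), this 2 (by norm_num) (by norm_num),
          this 3 (by norm_num) (by norm_num), this 4 (by norm_num) (by norm_num),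
          this 5 (by norm_num) (by norm_num), this 6 (by norm_num) (by norm_num)]

theorem B_eq (cleaned : List (String × String)) :
    sort_runners_alt cleaned
      = lenF cleaned 1 ++ lenF cleaned 2 ++ lenF cleaned 3 ++ lenF cleaned 4
        ++ lenF cleaned 5 ++ lenF cleaned 6 := by
  unfold sort_runners_alt
  have : (List.replicate 6 ([] : List (String × String))) = [[], [], [], [], [], []] := rfl
  rw [this, B_inv cleaned]
  simp [List.append_assoc]

-- ===== VERDICT (by name: the statement is the Claim_ definition above) =====
theorem sort_runners_spec : Claim_equal_sort_runners := by
  intro cleaned _ hpre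
  unfold Spec_sort_runners
  rw [A_eq cleaned hpre, B_eq cleaned]
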